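-- pv_equiv track=rewrite | github.com/amir-zeldes/ppfst | main.py | tokenize_lexc
-- ===== SOURCE A (Python) =====
-- def tokenize_lexc(line):
--     ret = []
--     cur = ''
--     esc = False
--     for c in line:
--         if esc:
--             cur += c
--             esc = False
--         elif c == '%':
--             esc = True
--         elif c.isspace():
--             if cur:
--                 ret.append(cur)
--             cur = ''
--         elif c == '!':
--             break
--         elif c in ':;':
--             if cur:
--                 ret.append(cur)
--             ret.append(c)
--             cur = ''
--         # TODO: regex in <>
--         else:
--             cur += c
--     if cur:
--         ret.append(cur)
--     return ret
-- ===== SOURCE B (Python) =====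
-- def _decode(line):
--     # pass 1: resolve '%'-escapes into tagged (char, escaped) items, stopping at an unescaped '!'
--     items = []
--     i = 0
--     n = len(line)
--     while i < n:
--         c = line[i]
--         if c == '%':
--             if i + 1 < n:
--                 items.append((line[i + 1], True))
--             i += 2
--         elif c == '!':
--             break
--         else:
--             items.append((c, False))
--             i += 1
--     return items
--
--
-- def _split(items):
--     # pass 2: recursively cut the decoded stream at its first unescaped separator
--     for k, (c, esc) in enumerate(items):
--         if not esc and (c.isspace() or c in ':;'):
--             head = [''.join(ch for ch, _ in items[:k])] if k > 0 else []
--             sep = [] if c.isspace() else [c]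
--             return head + sep + _split(items[k + 1:])
--     return [''.join(ch for ch, _ in items)] if items else []
--
--
-- def tokenize_lexc(line):
--     return _split(_decode(line))
-- ===== Notes on version B (the rewrite author's own statement) =====
-- stated objective: alternative
-- what changed: Replaced A's single-pass esc-flag state machine with a two-stage pipeline: a decoding pass that resolves %-escapes into a tagged (char, escaped) stream truncated at the comment, followed by a recursive splitter that cuts the stream at its first unescaped separator and recurses on the remainder.
import Mathlib
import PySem

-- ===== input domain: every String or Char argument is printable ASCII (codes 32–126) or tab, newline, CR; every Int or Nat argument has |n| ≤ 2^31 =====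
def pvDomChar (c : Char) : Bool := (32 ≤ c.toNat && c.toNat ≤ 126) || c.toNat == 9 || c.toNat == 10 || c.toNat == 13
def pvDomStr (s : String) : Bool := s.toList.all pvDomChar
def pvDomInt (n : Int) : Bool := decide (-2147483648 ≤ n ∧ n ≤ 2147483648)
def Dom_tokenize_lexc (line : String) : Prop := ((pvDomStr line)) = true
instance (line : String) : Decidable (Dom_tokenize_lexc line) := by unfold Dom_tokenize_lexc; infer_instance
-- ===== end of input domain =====

-- B replaces A's one-pass esc-flag state machine by a decode pass (escape resolution + comment cut)
-- followed by a recursive split at the first unescaped separator (alternative decomposition).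

-- ===== PORT A =====
-- literal port of A: fold over the characters with state (ret, cur, esc); '!' breaks, final flush of cur
def tokALoop : List Char → List String → String → Bool → List String
  | [], ret, cur, _ => if cur ≠ "" then ret ++ [cur] else ret
  | c :: rest, ret, cur, esc =>
    if esc then tokALoop rest ret (cur.push c) false
    else if c = '%' then tokALoop rest ret cur true
    else if PySem.Chars.isspace c then
      tokALoop rest (if cur ≠ "" then ret ++ [cur] else ret) "" false
    else if c = '!' then
      -- break: exit the loop, then the trailing flush runs
      if cur ≠ "" then ret ++ [cur] else ret
    else if c = ':' ∨ c = ';' then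
      tokALoop rest ((if cur ≠ "" then ret ++ [cur] else ret) ++ [String.ofList [c]]) "" false
    else tokALoop rest ret (cur.push c) false

def tokenize_lexc (line : String) : List String :=
  tokALoop line.toList [] "" false

-- ===== PORT B =====
-- literal port of Source B's _decode: index loop (lookahead consumption of '%') as recursion on the chars
def decodeB : List Char → List (Char × Bool)
  | [] => []
  | [c] => if c = '%' then [] else if c = '!' then [] else [(c, false)]
  | c :: c2 :: rest =>
    if c = '%' then (c2, true) :: decodeB rest
    else if c = '!' then []
    else (c, false) :: decodeB (c2 :: rest)

def isSepB (x : Char × Bool) : Bool :=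
  !x.2 && (PySem.Chars.isspace x.1 || x.1 = ':' || x.1 = ';')

-- the enumerate-scan of Source B's _split: first separator index and its character
def findSepB : List (Char × Bool) → Option (Nat × Char)
  | [] => none
  | x :: rest => if isSepB x then some (0, x.1) else (findSepB rest).map (fun p => (p.1 + 1, p.2))

-- literal port of Source B's _split: cut at first separator (slices items[:k], items[k+1:]), recurse
def splitB (items : List (Char × Bool)) : List String :=
  match h : findSepB items with
  | none => if items = [] then [] else [String.ofList (items.map Prod.fst)]
  | some (k, c) =>
    (if k > 0 then [String.ofList ((items.take k).map Prod.fst)] else [])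
      ++ (if PySem.Chars.isspace c then [] else [String.ofList [c]])
      ++ splitB (items.drop (k + 1))
termination_by items.length
decreasing_by
  cases items with
  | nil => simp [findSepB] at h
  | cons y ys => simp [List.length_drop]

def tokenize_lexc_alt (line : String) : List String :=
  splitB (decodeB line.toList)

-- ===== PRECONDITION & SPEC =====
def Spec_tokenize_lexc (line : String) (out : List String) : Prop := out = tokenize_lexc_alt line
instance (line : String) (out : List String) : Decidable (Spec_tokenize_lexc line out) := by unfold Spec_tokenize_lexc; infer_instance

-- ===== CLAIM (what is proved, stated in full; the proofs are below) =====
def Claim_equal_tokenize_lexc : Prop := ∀ (line : String), Dom_tokenize_lexc line → Spec_tokenize_lexc line (tokenize_lexc line)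

-- ===== LEMMAS AND PROOFS =====

theorem ofList_push (l : List Char) (c : Char) :
    (String.ofList l).push c = String.ofList (l ++ [c]) := by
  apply String.ext; simp

theorem ofList_eq_empty (l : List Char) : (String.ofList l = "") ↔ l = [] := by
  simp [String.ext_iff]

theorem findSepB_append_nonsep (pre : List (Char × Bool)) (hpre : ∀ x ∈ pre, isSepB x = false) :
    ∀ items, findSepB (pre ++ items) = (findSepB items).map (fun p => (p.1 + pre.length, p.2)) := by
  induction pre with
  | nil => intro items; cases h : findSepB items <;> simp [h]
  | cons y ys ih =>
    intro items
    have hy : isSepB y = false := hpre y (by simp)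
    have := ih (fun x hx => hpre x (by simp [hx])) items
    simp only [List.cons_append, findSepB, hy, this, List.length_cons]
    cases h : findSepB items <;> simp
    omega

theorem splitB_nonsep (pre : List (Char × Bool)) (hpre : ∀ x ∈ pre, isSepB x = false) :
    splitB pre = if pre = [] then [] else [String.ofList (pre.map Prod.fst)] := by
  have hn : findSepB pre = none := by
    have := findSepB_append_nonsep pre hpre []
    simp [findSepB] at this
    exact this
  rw [splitB]
  split
  · rfl
  · rename_i k c h
    rw [hn] at h; exact absurd h (by simp)

theorem splitB_sep (pre : List (Char × Bool)) (hpre : ∀ x ∈ pre, isSepB x = false)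
    (c : Char) (e : Bool) (hsep : isSepB (c, e) = true) (rest : List (Char × Bool)) :
    splitB (pre ++ (c, e) :: rest) =
      (if pre = [] then [] else [String.ofList (pre.map Prod.fst)])
        ++ (if PySem.Chars.isspace c then [] else [String.ofList [c]]) ++ splitB rest := by
  have hf : findSepB (pre ++ (c, e) :: rest) = some (pre.length, c) := by
    rw [findSepB_append_nonsep pre hpre]
    simp [findSepB, hsep]
  rw [splitB]
  split
  · rename_i h; rw [hf] at h; exact absurd h (by simp)
  · rename_i k c' h
    rw [hf] at h
    obtain ⟨hk, hc⟩ : pre.length = k ∧ c = c' := by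
      constructor <;> [exact congrArg (·.1) (Option.some.inj h); exact congrArg (·.2) (Option.some.inj h)]
    subst hk; subst hc
    have htake : (pre ++ (c, e) :: rest).take pre.length = pre := by
      simpa using List.take_left pre ((c, e) :: rest)
    have hdrop : (pre ++ (c, e) :: rest).drop (pre.length + 1) = rest := by
      have h1 : (pre ++ (c, e) :: rest).drop pre.length = (c, e) :: rest := by
        simp
      calc (pre ++ (c, e) :: rest).drop (pre.length + 1)
          = ((pre ++ (c, e) :: rest).drop pre.length).drop 1 := by
            rw [List.drop_drop]
        _ = rest := by rw [h1]; rfl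
    rw [htake, hdrop]
    by_cases hp : pre = []
    · subst hp; simp
    · have hl : 0 < pre.length := List.length_pos_iff.mpr hp
      simp [hp, hl]

-- main invariant: A's loop from state (ret, cur = chars of pre, esc = false) equals
-- ret ++ B's split applied to pre (already-decoded, separator-free) followed by the decode of the rest
theorem tokLoop_eq (n : Nat) : ∀ cs : List Char, cs.length ≤ n →
    ∀ (ret : List String) (pre : List (Char × Bool)), (∀ x ∈ pre, isSepB x = false) →
    tokALoop cs ret (String.ofList (pre.map Prod.fst)) false = ret ++ splitB (pre ++ decodeB cs) := by
  induction n with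
  | zero =>
    intro cs h ret pre hpre
    have : cs = [] := List.length_eq_zero_iff.mp (Nat.le_zero.mp h)
    subst this
    rw [show tokALoop [] ret (String.ofList (pre.map Prod.fst)) false
        = (if String.ofList (pre.map Prod.fst) ≠ "" then
            ret ++ [String.ofList (pre.map Prod.fst)] else ret) from rfl,
      show decodeB [] = [] from rfl, List.append_nil, splitB_nonsep pre hpre]
    by_cases hp : pre = [] <;> simp [hp, ofList_eq_empty]
  | succ n ih =>
    intro cs h ret pre hpre
    cases cs with
    | nil =>
      rw [show tokALoop [] ret (String.ofList (pre.map Prod.fst)) false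
          = (if String.ofList (pre.map Prod.fst) ≠ "" then
              ret ++ [String.ofList (pre.map Prod.fst)] else ret) from rfl,
        show decodeB [] = [] from rfl, List.append_nil, splitB_nonsep pre hpre]
      by_cases hp : pre = [] <;> simp [hp, ofList_eq_empty]
    | cons c rest =>
      simp only [List.length_cons, Nat.succ_le_succ_iff] at h
      by_cases hp : c = '%'
      · subst hp
        cases rest with
        | nil =>
          have hA : tokALoop ['%'] ret (String.ofList (pre.map Prod.fst)) false
              = (if String.ofList (pre.map Prod.fst) ≠ "" then
                  ret ++ [String.ofList (pre.map Prod.fst)] else ret) := by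
            simp [tokALoop]
          rw [hA, show decodeB ['%'] = [] from by simp [decodeB], List.append_nil,
            splitB_nonsep pre hpre]
          by_cases hq : pre = [] <;> simp [hq, ofList_eq_empty]
        | cons c2 rest2 =>
          have hA : tokALoop ('%' :: c2 :: rest2) ret (String.ofList (pre.map Prod.fst)) false
              = tokALoop rest2 ret ((String.ofList (pre.map Prod.fst)).push c2) false := by
            simp [tokALoop]
          have hpre2 : ∀ x ∈ pre ++ [(c2, true)], isSepB x = false := by
            intro x hx
            rcases List.mem_append.mp hx with hx | hx
            · exact hpre x hx
            · simp at hx; subst hx; simp [isSepB]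
          rw [hA, ofList_push]
          have : (pre.map Prod.fst) ++ [c2] = (pre ++ [(c2, true)]).map Prod.fst := by simp
          rw [this, ih rest2 (Nat.le_of_succ_le h) ret (pre ++ [(c2, true)]) hpre2,
            show decodeB ('%' :: c2 :: rest2) = (c2, true) :: decodeB rest2 from by simp [decodeB]]
          simp only [List.append_assoc, List.cons_append, List.nil_append]
      · by_cases hb : c = '!'
        · subst hb
          have hA : tokALoop ('!' :: rest) ret (String.ofList (pre.map Prod.fst)) false
              = (if String.ofList (pre.map Prod.fst) ≠ "" then
                  ret ++ [String.ofList (pre.map Prod.fst)] else ret) := by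
            simp [tokALoop, PySem.Chars.isspace]
          have hD : decodeB ('!' :: rest) = [] := by
            cases rest <;> simp [decodeB]
          rw [hA, hD, List.append_nil, splitB_nonsep pre hpre]
          by_cases hq : pre = [] <;> simp [hq, ofList_eq_empty]
        · have hD : decodeB (c :: rest) = (c, false) :: decodeB rest := by
            cases rest <;> simp [decodeB, hp, hb]
          rw [hD]
          by_cases hs : PySem.Chars.isspace c = true
          · have hA : tokALoop (c :: rest) ret (String.ofList (pre.map Prod.fst)) false
                = tokALoop rest (if String.ofList (pre.map Prod.fst) ≠ "" then
                    ret ++ [String.ofList (pre.map Prod.fst)] else ret) "" false := by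
              simp only [tokALoop, Bool.false_eq_true, if_false, if_neg hp, if_pos hs]
            have h0 : ("" : String) = String.ofList (([] : List (Char × Bool)).map Prod.fst) := rfl
            rw [hA, h0, ih rest h _ [] (by simp), List.nil_append,
              splitB_sep pre hpre c false (by simp [isSepB, hs]) (decodeB rest)]
            simp only [if_pos hs, ne_eq, ofList_eq_empty, List.append_nil]
            by_cases hq : pre = [] <;> simp [hq]
          · by_cases hc : c = ':' ∨ c = ';'
            · have hA : tokALoop (c :: rest) ret (String.ofList (pre.map Prod.fst)) false
                  = tokALoop rest ((if String.ofList (pre.map Prod.fst) ≠ "" then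
                      ret ++ [String.ofList (pre.map Prod.fst)] else ret) ++ [String.ofList [c]])
                      "" false := by
                simp only [tokALoop, Bool.false_eq_true, if_false, if_neg hp, if_neg hb, if_neg hs,
                  if_pos hc]
              have h0 : ("" : String) = String.ofList (([] : List (Char × Bool)).map Prod.fst) := rfl
              have hsep : isSepB (c, false) = true := by
                rcases hc with hc | hc <;> simp [isSepB, hc]
              rw [hA, h0, ih rest h _ [] (by simp), List.nil_append,
                splitB_sep pre hpre c false hsep (decodeB rest)]
              simp only [if_neg hs, ne_eq, ofList_eq_empty]
              by_cases hq : pre = [] <;> simp [hq]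
            · have hA : tokALoop (c :: rest) ret (String.ofList (pre.map Prod.fst)) false
                  = tokALoop rest ret ((String.ofList (pre.map Prod.fst)).push c) false := by
                simp only [tokALoop, Bool.false_eq_true, if_false, if_neg hp, if_neg hb, if_neg hs,
                  if_neg hc]
              have hpre2 : ∀ x ∈ pre ++ [(c, false)], isSepB x = false := by
                intro x hx
                rcases List.mem_append.mp hx with hx | hx
                · exact hpre x hx
                · simp at hx; subst hx
                  have h1 : c ≠ ':' := fun hh => hc (Or.inl hh)
                  have h2 : c ≠ ';' := fun hh => hc (Or.inr hh)
                  simp [isSepB, hs, h1, h2]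
              rw [hA, ofList_push]
              have : (pre.map Prod.fst) ++ [c] = (pre ++ [(c, false)]).map Prod.fst := by simp
              rw [this, ih rest h ret (pre ++ [(c, false)]) hpre2]
              simp only [List.append_assoc, List.cons_append, List.nil_append]

-- ===== VERDICT (by name: the statement is the Claim_ definition above) =====
theorem tokenize_lexc_spec : Claim_equal_tokenize_lexc := by
  intro line _
  unfold Spec_tokenize_lexc tokenize_lexc tokenize_lexc_alt
  have h0 : ("" : String) = String.ofList (([] : List (Char × Bool)).map Prod.fst) := rfl
  rw [h0, tokLoop_eq line.toList.length line.toList le_rfl [] [] (by simp), List.nil_append,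
    List.nil_append]
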